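-- pv_equiv track=rewrite | github.com/jeanbaptistemora/fluidattacks-universe2 | serves/analytics/singer/streamer_pcap/streamer_pcap/__init__.py | string_escape
-- ===== SOURCE A (Python) =====
-- def string_escape(string: str) -> str:
--     """Escape a string to HEX.
--
--     Packet data comes with not safe chars for YAML or JSON.
--     They must be escaped and are recognized for beeing surrounded by ' or ".
--     """
--     # Return if not surrounded with ' or "
--     if len(string) <= 2:
--         return string
--     for char in ("'", '"'):
--         if string[0] == char and string[-1] == char:
--             break
--     else:
--         return string
--
--     new_string = ""
--     reading_byte = 0
--     for char in string[1:-2]: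
--         if reading_byte == 0:
--             new_string += char.encode("ascii").hex().upper()
--         elif reading_byte == 1 and char == "\\":
--             reading_byte = 2
--         elif reading_byte == 2 and char == "x":
--             reading_byte = 3
--         elif reading_byte == 3:
--             reading_byte = 0
--             new_string += char.upper()
--     return new_string
-- ===== SOURCE B (Python) =====
-- def string_escape(string: str) -> str:
--     """Escape a string to HEX (bulk encode instead of a per-char loop)."""
--     if len(string) <= 2:
--         return string
--     if string[0] != string[-1] or string[0] not in ("'", '"'):
--         return string
--     return string[1:-2].encode("ascii").hex().upper()
-- ===== Notes on version B (the rewrite author's own statement) =====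
-- stated objective: simpler
-- what changed: Replaces the per-character loop with its dead reading_byte state machine by a single bulk encode().hex().upper() call on the [1:-2] slice, and folds the for/else quote check into one direct comparison.
import Mathlib
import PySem

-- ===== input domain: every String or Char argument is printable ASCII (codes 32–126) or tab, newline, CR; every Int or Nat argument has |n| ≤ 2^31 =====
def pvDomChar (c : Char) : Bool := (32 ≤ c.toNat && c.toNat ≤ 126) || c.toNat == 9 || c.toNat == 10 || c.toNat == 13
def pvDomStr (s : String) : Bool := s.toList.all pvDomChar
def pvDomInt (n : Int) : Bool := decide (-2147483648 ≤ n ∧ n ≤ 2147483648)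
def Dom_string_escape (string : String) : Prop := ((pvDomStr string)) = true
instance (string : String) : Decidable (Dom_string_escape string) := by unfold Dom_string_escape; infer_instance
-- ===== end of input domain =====

-- B replaces A's per-character loop (with its dead reading_byte state machine) by one bulk
-- hex conversion of the [1:-2] slice; objective: simpler.


-- ===== PORT A =====
-- char.encode("ascii").hex().upper() of a single ASCII char: two uppercase hex digits
def pvHexDigit (n : Nat) : Char := if n < 10 then Char.ofNat (48 + n) else Char.ofNat (55 + n)
def pvCharHex (c : Char) : List Char := [pvHexDigit (c.toNat / 16), pvHexDigit (c.toNat % 16)]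
-- char.upper() for one ASCII char (exact on the stated ASCII domain)
def pvCharUpper (c : Char) : Char :=
  if 97 ≤ c.toNat ∧ c.toNat ≤ 122 then Char.ofNat (c.toNat - 32) else c

def string_escape (string : String) : String :=
  let cs := string.toList
  if cs.length ≤ 2 then string
  else if (PySem.List.pyGetD cs 0 ' ' = '\'' ∧ PySem.List.pyGetD cs (-1) ' ' = '\'') ∨
          (PySem.List.pyGetD cs 0 ' ' = '"' ∧ PySem.List.pyGetD cs (-1) ' ' = '"') then
    -- new_string = ""; reading_byte = 0; for char in string[1:-2]: …
    let res := (PySem.List.slice cs (some 1) (some (-2))).foldl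
      (fun (st : List Char × Int) c =>
        if st.2 = 0 then (st.1 ++ pvCharHex c, st.2)
        else if st.2 = 1 ∧ c = '\\' then (st.1, 2)
        else if st.2 = 2 ∧ c = 'x' then (st.1, 3)
        else if st.2 = 3 then (st.1 ++ [pvCharUpper c], 0)
        else st) ([], 0)
    String.mk res.1
  else string

-- ===== PORT B =====
def string_escape_alt (string : String) : String :=
  let cs := string.toList
  if cs.length ≤ 2 then string
  else if PySem.List.pyGetD cs 0 ' ' ≠ PySem.List.pyGetD cs (-1) ' ' ∨
          (PySem.List.pyGetD cs 0 ' ' ≠ '\'' ∧ PySem.List.pyGetD cs 0 ' ' ≠ '"') then string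
  else String.mk ((PySem.List.slice cs (some 1) (some (-2))).flatMap pvCharHex)

-- ===== PRECONDITION & SPEC =====
def Spec_string_escape (string : String) (out : String) : Prop := out = string_escape_alt string
instance (string : String) (out : String) : Decidable (Spec_string_escape string out) := by unfold Spec_string_escape; infer_instance

-- ===== CLAIM (what is proved, stated in full; the proofs are below) =====
def Claim_equal_string_escape : Prop := ∀ (string : String), Dom_string_escape string → Spec_string_escape string (string_escape string)

-- ===== LEMMAS AND PROOFS =====

-- A's loop, started in state 0, stays in state 0 and appends pvCharHex of each char
theorem pvFold_eq (l : List Char) (acc : List Char) :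
    l.foldl (fun (st : List Char × Int) c =>
        if st.2 = 0 then (st.1 ++ pvCharHex c, st.2)
        else if st.2 = 1 ∧ c = '\\' then (st.1, 2)
        else if st.2 = 2 ∧ c = 'x' then (st.1, 3)
        else if st.2 = 3 then (st.1 ++ [pvCharUpper c], 0)
        else st) (acc, 0) = (acc ++ l.flatMap pvCharHex, 0) := by
  induction l generalizing acc with
  | nil => simp
  | cons c l ih => simp [List.foldl_cons, ih]

-- the two quote guards are logically the same condition
theorem pvGuard_iff (x y : Char) :
    ((x = '\'' ∧ y = '\'') ∨ (x = '"' ∧ y = '"')) ↔ ¬(x ≠ y ∨ (x ≠ '\'' ∧ x ≠ '"')) := by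
  constructor
  · rintro (⟨h1, h2⟩ | ⟨h1, h2⟩) <;> subst h1 <;> subst h2 <;> simp
  · intro h
    rw [not_or] at h
    obtain ⟨hxy, hq⟩ := h
    have hxy' : x = y := not_not.mp hxy
    subst hxy'
    by_cases hx : x = '\''
    · exact Or.inl ⟨hx, hx⟩
    · have hx2 : x = '"' := by
        by_contra hx2
        exact hq ⟨hx, hx2⟩
      exact Or.inr ⟨hx2, hx2⟩

-- ===== VERDICT (by name: the statement is the Claim_ definition above) =====
theorem string_escape_spec : Claim_equal_string_escape := by
  intro s _
  unfold Spec_string_escape string_escape string_escape_alt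
  simp only [String.length_toList]
  by_cases hlen : s.length ≤ 2
  · simp [hlen]
  · simp only [hlen, if_false]
    by_cases hg : (PySem.List.pyGetD s.toList 0 ' ' = '\'' ∧ PySem.List.pyGetD s.toList (-1) ' ' = '\'') ∨
        (PySem.List.pyGetD s.toList 0 ' ' = '"' ∧ PySem.List.pyGetD s.toList (-1) ' ' = '"')
    · have hb := (pvGuard_iff _ _).mp hg
      simp [hg, hb, pvFold_eq]
    · have hb : (PySem.List.pyGetD s.toList 0 ' ' ≠ PySem.List.pyGetD s.toList (-1) ' ' ∨
          (PySem.List.pyGetD s.toList 0 ' ' ≠ '\'' ∧ PySem.List.pyGetD s.toList 0 ' ' ≠ '"')) := by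
        by_contra hc
        exact hg ((pvGuard_iff _ _).mpr hc)
      simp [hg, hb]
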